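-- pv_equiv track=rewrite | github.com/imagination-research/EEP | opencompass/tasks/search.py | set_all_weights_group
-- ===== SOURCE A (Python) =====
-- def set_all_weights_group(layer_num, cfg, group_num=None):
--     cfg["weight_group"] = []
--     if group_num is None:
--         group_num = layer_num
--         cfg["weight_group"] = [f"layer.{idx}" for idx in range(group_num - 1)]
--
--     group_start = 0
--     for i in range(group_num - 1):
--         group_end = group_start + layer_num // group_num - 1
--         cfg["weight_group"].append(f"layer.[{group_start}-{group_end}]")
--         group_start = group_end + 1
--     cfg["weight_group"].append("others")
--     return cfg
-- ===== SOURCE B (Python) =====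
-- def set_all_weights_group(layer_num, cfg, group_num=None):
--     if group_num is None:
--         group_num = layer_num
--         labels = [f"layer.{i}" for i in range(layer_num - 1)]
--     else:
--         labels = []
--     labels += [f"layer.[{i * (layer_num // group_num)}-{(i + 1) * (layer_num // group_num) - 1}]"
--                for i in range(group_num - 1)]
--     labels.append("others")
--     cfg["weight_group"] = labels
--     return cfg
-- ===== Notes on version B (the rewrite author's own statement) =====
-- stated objective: simpler
-- what changed: Replaces the accumulator-driven loop that repeatedly appends into cfg['weight_group'] (tracking group_start across iterations) with closed-form index arithmetic: group i spans [i*step, (i+1)*step-1], so the labels are built in one comprehension and assigned to the dict once.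
import Mathlib
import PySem

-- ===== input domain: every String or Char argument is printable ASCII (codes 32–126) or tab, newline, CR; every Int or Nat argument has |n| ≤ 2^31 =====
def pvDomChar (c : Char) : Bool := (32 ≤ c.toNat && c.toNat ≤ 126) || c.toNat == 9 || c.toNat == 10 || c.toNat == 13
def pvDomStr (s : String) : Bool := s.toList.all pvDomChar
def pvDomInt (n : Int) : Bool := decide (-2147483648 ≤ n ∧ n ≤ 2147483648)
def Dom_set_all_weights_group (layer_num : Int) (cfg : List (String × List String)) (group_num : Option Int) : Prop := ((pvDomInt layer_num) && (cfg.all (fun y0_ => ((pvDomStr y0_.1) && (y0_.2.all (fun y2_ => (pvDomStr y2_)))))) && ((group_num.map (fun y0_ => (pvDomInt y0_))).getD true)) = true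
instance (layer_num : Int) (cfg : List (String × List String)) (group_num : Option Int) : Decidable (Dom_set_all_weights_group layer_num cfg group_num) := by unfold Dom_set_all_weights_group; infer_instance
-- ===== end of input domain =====

-- B replaces A's accumulator loop (appending into cfg["weight_group"] while tracking
-- group_start) with a closed-form comprehension (group i spans [i*step,(i+1)*step-1]) and a
-- single dict assignment; equivalence is about the returned dict (both also mutate cfg alike).


-- ===== PORT A =====
def set_all_weights_group (layer_num : Int) (cfg : List (String × List String)) (group_num : Option Int) : List (String × List String) :=
  -- cfg["weight_group"] = []
  let d := (PySem.Dict.mk cfg).insert "weight_group" []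
  -- if group_num is None: group_num = layer_num; cfg["weight_group"] = [f"layer.{idx}" ...]
  let st0 : Int × PySem.Dict String (List String) :=
    match group_num with
    | none => (layer_num, d.insert "weight_group"
        ((PySem.List.pyRange 0 (layer_num - 1) 1).map (fun idx => "layer." ++ PySem.Int.toStr idx)))
    | some g => (g, d)
  let gn := st0.1
  -- for i in range(group_num - 1): append f"layer.[{group_start}-{group_end}]"; advance group_start
  let st := (PySem.List.pyRange 0 (gn - 1) 1).foldl
    (fun (st : PySem.Dict String (List String) × Int) _i =>
      let ge := st.2 + PySem.Int.floordiv layer_num gn - 1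
      (st.1.modify "weight_group" []
        (fun wg => wg ++ ["layer.[" ++ PySem.Int.toStr st.2 ++ "-" ++ PySem.Int.toStr ge ++ "]"]),
       ge + 1))
    (st0.2, 0)
  -- cfg["weight_group"].append("others"); return cfg
  (st.1.modify "weight_group" [] (fun wg => wg ++ ["others"])).items

-- ===== PORT B =====
def set_all_weights_group_alt (layer_num : Int) (cfg : List (String × List String)) (group_num : Option Int) : List (String × List String) :=
  let init : Int × List String :=
    match group_num with
    | none => (layer_num, (PySem.List.pyRange 0 (layer_num - 1) 1).map (fun i => "layer." ++ PySem.Int.toStr i))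
    | some g => (g, [])
  let gn := init.1
  let labels := init.2
    ++ (PySem.List.pyRange 0 (gn - 1) 1).map (fun i =>
        "layer.[" ++ PySem.Int.toStr (i * PySem.Int.floordiv layer_num gn) ++ "-"
          ++ PySem.Int.toStr ((i + 1) * PySem.Int.floordiv layer_num gn - 1) ++ "]")
    ++ ["others"]
  ((PySem.Dict.mk cfg).insert "weight_group" labels).items

-- ===== PRECONDITION & SPEC =====
def Spec_set_all_weights_group (layer_num : Int) (cfg : List (String × List String)) (group_num : Option Int) (out : List (String × List String)) : Prop := out = set_all_weights_group_alt layer_num cfg group_num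
instance (layer_num : Int) (cfg : List (String × List String)) (group_num : Option Int) (out : List (String × List String)) : Decidable (Spec_set_all_weights_group layer_num cfg group_num out) := by unfold Spec_set_all_weights_group; infer_instance

-- ===== CLAIM (what is proved, stated in full; the proofs are below) =====
def Claim_equal_set_all_weights_group : Prop := ∀ (layer_num : Int) (cfg : List (String × List String)) (group_num : Option Int), Dom_set_all_weights_group layer_num cfg group_num → Spec_set_all_weights_group layer_num cfg group_num (set_all_weights_group layer_num cfg group_num)

-- ===== LEMMAS AND PROOFS =====

-- the group label string (proof-side abbreviation; definitionally what both ports build)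
def pvLbl (x y : Int) : String :=
  "layer.[" ++ PySem.Int.toStr x ++ "-" ++ PySem.Int.toStr y ++ "]"

-- modifying the key just inserted rewrites its value in place
theorem modify_insert_self (d : PySem.Dict String (List String)) (k : String)
    (v : List String) (dflt : List String) (f : List String → List String) :
    (d.insert k v).modify k dflt f = d.insert k (f v) := by
  simp [PySem.Dict.modify, PySem.Dict.getD_insert_self, PySem.Dict.insert_insert_self]

-- invariant of A's loop: starting from group_start = gs with value L stored at the key,
-- folding over any list appends one closed-form label per element and advances gs by q each step
theorem foldA_invariant (layer_num gn : Int) (l : List Int)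
    (d : PySem.Dict String (List String)) (L : List String) (gs : Int) :
    l.foldl
      (fun (st : PySem.Dict String (List String) × Int) _i =>
        let ge := st.2 + PySem.Int.floordiv layer_num gn - 1
        (st.1.modify "weight_group" []
          (fun wg => wg ++ ["layer.[" ++ PySem.Int.toStr st.2 ++ "-" ++ PySem.Int.toStr ge ++ "]"]),
         ge + 1))
      (d.insert "weight_group" L, gs)
    = (d.insert "weight_group" (L ++ (List.range l.length).map (fun (j : Nat) =>
          pvLbl (gs + (j : Int) * PySem.Int.floordiv layer_num gn)
                (gs + (j : Int) * PySem.Int.floordiv layer_num gn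
                  + PySem.Int.floordiv layer_num gn - 1))),
       gs + l.length * PySem.Int.floordiv layer_num gn) := by
  set q := PySem.Int.floordiv layer_num gn with hq
  induction l generalizing L gs with
  | nil => simp
  | cons a t ih =>
    simp only [List.foldl_cons, modify_insert_self]
    have hgs : gs + q - 1 + 1 = gs + q := by ring
    rw [hgs, ih]
    simp only [Prod.mk.injEq]
    refine ⟨?_, ?_⟩
    · congr 1
      rw [List.length_cons, List.range_succ_eq_map, List.map_cons, List.map_map,
          List.append_assoc]
      congr 1
      rw [List.singleton_append]
      congr 1
      · show pvLbl gs (gs + q - 1) = pvLbl _ _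
        congr 1 <;> push_cast <;> ring
      · apply List.map_congr_left
        intro j _
        simp only [Function.comp, Nat.succ_eq_add_one]
        congr 1 <;> push_cast <;> ring
    · simp only [List.length_cons]
      push_cast; ring

-- the shared core: A's fold-then-append equals B's one-shot insert of the closed-form labels
theorem core_eq (layer_num gn : Int) (d : PySem.Dict String (List String)) (L : List String) :
    (((PySem.List.pyRange 0 (gn - 1) 1).foldl
        (fun (st : PySem.Dict String (List String) × Int) _i =>
          let ge := st.2 + PySem.Int.floordiv layer_num gn - 1
          (st.1.modify "weight_group" []
            (fun wg => wg ++ ["layer.[" ++ PySem.Int.toStr st.2 ++ "-" ++ PySem.Int.toStr ge ++ "]"]),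
           ge + 1))
        (d.insert "weight_group" L, 0)).1.modify "weight_group" [] (fun wg => wg ++ ["others"]))
    = d.insert "weight_group" (L
        ++ (PySem.List.pyRange 0 (gn - 1) 1).map (fun i =>
            "layer.[" ++ PySem.Int.toStr (i * PySem.Int.floordiv layer_num gn) ++ "-"
              ++ PySem.Int.toStr ((i + 1) * PySem.Int.floordiv layer_num gn - 1) ++ "]")
        ++ ["others"]) := by
  rw [foldA_invariant, modify_insert_self]
  congr 1
  congr 2
  rw [PySem.List.length_pyRange_one, PySem.List.pyRange_one, List.map_map]
  apply List.map_congr_left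
  intro j _
  show pvLbl _ _ = pvLbl _ _
  congr 1 <;> push_cast <;> ring

-- ===== VERDICT (by name: the statement is the Claim_ definition above) =====
theorem set_all_weights_group_spec : Claim_equal_set_all_weights_group := by
  intro layer_num cfg group_num _hdom
  unfold Spec_set_all_weights_group set_all_weights_group set_all_weights_group_alt
  cases group_num with
  | none =>
      simp only
      rw [PySem.Dict.insert_insert_self, core_eq]
  | some g =>
      simp only
      rw [core_eq]
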